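-- pv_equiv track=rewrite | github.com/hkhaisty/Practice | CCI/Python3/BitManipulation/flip_bit_to_win.py | flip_bit_optimal
-- ===== SOURCE A (Python) =====
-- def flip_bit_optimal(number):
--     curr_length = prev_length = 0
--     max_length = 0
--     while number != 0:
--         if (number & 1) == 1:
--             curr_length += 1
--         elif (number & 1) == 0:
--             prev_length = 0 if (number & 2) == 0 else curr_length
--             curr_length = 0
--         max_length = max(prev_length + curr_length + 1, max_length)
--         number >>= 1
--
--     return max_length
-- ===== SOURCE B (Python) =====
-- def flip_bit_optimal(number):
--     # Run-length encode the bits (LSB first), then scan the runs of ones,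
--     # merging two such runs separated by a single-zero run.
--     runs = []
--     n = number
--     while n != 0:
--         b = n & 1
--         length = 0
--         while n != 0 and (n & 1) == b:
--             length += 1
--             n >>= 1
--         runs.append((b, length))
--     best = 0
--     while runs:
--         (b, length), rest = runs[0], runs[1:]
--         if b == 1:
--             total = length + 1
--             if len(rest) >= 2 and rest[0] == (0, 1):
--                 total = length + rest[1][1] + 1
--             best = max(best, total)
--         runs = rest
--     return best
-- ===== Notes on version B (the rewrite author's own statement) =====
-- stated objective: alternative
-- what changed: B first run-length encodes the bits into (bit, length) runs and then scans the runs of ones, merging two such runs separated by a single zero, instead of A's per-bit state machine with current/previous run lengths.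
import Mathlib
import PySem

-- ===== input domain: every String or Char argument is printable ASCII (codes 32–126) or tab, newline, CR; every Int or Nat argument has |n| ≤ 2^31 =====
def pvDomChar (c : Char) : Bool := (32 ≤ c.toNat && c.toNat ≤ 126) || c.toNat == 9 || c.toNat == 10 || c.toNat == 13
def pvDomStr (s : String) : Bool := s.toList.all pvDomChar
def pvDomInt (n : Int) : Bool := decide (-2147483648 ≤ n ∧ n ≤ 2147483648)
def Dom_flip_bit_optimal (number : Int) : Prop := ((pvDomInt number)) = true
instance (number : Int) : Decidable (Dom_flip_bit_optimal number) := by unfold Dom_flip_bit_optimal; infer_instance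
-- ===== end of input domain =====

-- B re-implements A by run-length encoding the bits and scanning the runs of ones (objective:
-- alternative, same cost); A and B agree on all non-negative inputs (Python A never returns on
-- negative input).

-- ===== PORT A =====
-- A's while loop, as structural recursion on a fuel counter; number >>= 1 halves number each
-- iteration, so fuel = number.toNat + 1 never runs out on the inputs admitted by Pre_ (Python's
-- loop never terminates for negative number, which Pre_ excludes).
def loopA (fuel : Nat) (number curr_length prev_length max_length : Int) : Int :=
  match fuel with
  | 0 => max_length
  | fuel + 1 =>
    if number ≠ 0 then
      if PySem.Int.band number 1 = 1 then
        loopA fuel (number >>> 1) (curr_length + 1) prev_length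
          (max (prev_length + (curr_length + 1) + 1) max_length)
      else
        let prev' := if PySem.Int.band number 2 = 0 then 0 else curr_length
        loopA fuel (number >>> 1) 0 prev' (max (prev' + 0 + 1) max_length)
    else max_length

def flip_bit_optimal (number : Int) : Int := loopA (number.toNat + 1) number 0 0 0

-- ===== PORT B =====
-- inner while loop of B: consume one run of equal bits (same fuel guard as above)
def takeRun (fuel : Nat) (n b ln : Int) : Int × Int :=
  match fuel with
  | 0 => (n, ln)
  | fuel + 1 =>
    if n ≠ 0 ∧ PySem.Int.band n 1 = b then takeRun fuel (n >>> 1) b (ln + 1) else (n, ln)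

-- outer while loop of B: build the run-length encoding (LSB first)
def rleInt (fuel : Nat) (n : Int) : List (Int × Int) :=
  match fuel with
  | 0 => []
  | fuel + 1 =>
    if n ≠ 0 then
      let b := PySem.Int.band n 1
      let p := takeRun fuel n b 0
      (b, p.2) :: rleInt fuel p.1
    else []

-- scanning loop of B over the runs list
def scanRuns : List (Int × Int) → Int → Int
  | [], best => best
  | (b, ln) :: rest, best =>
    if b = 1 then
      let total :=
        match rest with
        | (b2, l2) :: (_, l3) :: _ => if b2 = 0 ∧ l2 = 1 then ln + l3 + 1 else ln + 1
        | _ => ln + 1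
      scanRuns rest (max best total)
    else scanRuns rest best

def flip_bit_optimal_alt (number : Int) : Int :=
  scanRuns (rleInt (number.toNat + 1) number) 0

-- ===== PRECONDITION & SPEC =====
-- Pre_ excludes exactly the negative inputs, on which Python A (and B) never returns:
-- `number >>= 1` by arithmetic shift keeps a negative number negative forever.
def Pre_flip_bit_optimal (number : Int) : Prop := 0 ≤ number
instance (number : Int) : Decidable (Pre_flip_bit_optimal number) := by unfold Pre_flip_bit_optimal; infer_instance
def pvWitness_flip_bit_optimal : Int := 1775
def Spec_flip_bit_optimal (number : Int) (out : Int) : Prop := out = flip_bit_optimal_alt number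
instance (number : Int) (out : Int) : Decidable (Spec_flip_bit_optimal number out) := by unfold Spec_flip_bit_optimal; infer_instance

-- ===== CLAIM (what is proved, stated in full; the proofs are below) =====
def Claim_equal_flip_bit_optimal : Prop := ∀ (number : Int), Dom_flip_bit_optimal number → Pre_flip_bit_optimal number → Spec_flip_bit_optimal number (flip_bit_optimal number)

-- ===== LEMMAS AND PROOFS =====

-- bits of a natural number, least significant first (no trailing falses)
def bitsN (n : Nat) : List Bool :=
  if n = 0 then [] else decide (n % 2 = 1) :: bitsN (n / 2)

-- A's loop on the bit list
def LA : List Bool → Int → Int → Int → Int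
  | [], _, _, m => m
  | b :: l, c, p, m =>
    if b then LA l (c + 1) p (max (p + (c + 1) + 1) m)
    else
      let p' := if l.head?.getD false then c else 0
      LA l 0 p' (max (p' + 0 + 1) m)

-- decode a runs list back to a bit list
def decodeR (R : List (Int × Int)) : List Bool :=
  R.flatMap fun q => List.replicate q.2.toNat (decide (q.1 = 1))

-- well-formed runs lists that start and end with a 1-run, alternating, lengths ≥ 1
inductive GoodR : List (Int × Int) → Prop
  | single (k : Int) : 1 ≤ k → GoodR [(1, k)]
  | cons (k z : Int) (R : List (Int × Int)) : 1 ≤ k → 1 ≤ z → GoodR R →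
      GoodR ((1, k) :: (0, z) :: R)

-- the maximum of A's future candidates, entering a 1-run with prev = p, curr = 0
def scanA : List (Int × Int) → Int → Int
  | [], _ => 0
  | (_, k) :: rest, p =>
    match rest with
    | [] => p + k + 1
    | (_, z) :: rest' => max (p + k + 1) (scanA rest' (if z = 1 then k else 0))

theorem band_one_natCast (m : Nat) : PySem.Int.band (↑m) 1 = ↑(m &&& 1) := by
  have h := PySem.Int.band_natCast m 1; norm_num at h ⊢; omega

theorem band_two_natCast (m : Nat) : PySem.Int.band (↑m) 2 = ↑(m &&& 2) := by
  have h := PySem.Int.band_natCast m 2; norm_num at h ⊢; omega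

theorem and_two_eq_zero (m : Nat) : m &&& 2 = 0 ↔ m / 2 % 2 = 0 := by
  have h := Nat.and_two_pow m 1
  norm_num at h
  rw [h, Nat.testBit_succ, Nat.testBit_zero]
  rcases Nat.mod_two_eq_zero_or_one (m / 2) with h2 | h2 <;> simp [h2]

theorem natCast_shiftRight (m : Nat) : ((↑m : Int) >>> 1) = ↑(m / 2) := by
  rw [show ((↑m : Int) >>> 1) = Int.ofNat (m >>> 1) from rfl, Nat.shiftRight_one]; rfl

theorem replicate_false_append_head (z : Nat) (hz : 1 ≤ z) (l : List Bool) :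
    (List.replicate z false ++ l).head?.getD false = false := by
  cases z with
  | zero => omega
  | succ z => rfl

-- head of bitsN (n/2) as a getD, vs the second bit of n
theorem bitsN_head_getD (m : Nat) : (bitsN m).head?.getD false = decide (0 < m ∧ m % 2 = 1) := by
  rw [bitsN]
  by_cases h : m = 0 <;> simp [h]
  omega

theorem decodeR_cons (q : Int × Int) (R : List (Int × Int)) :
    decodeR (q :: R) = List.replicate q.2.toNat (decide (q.1 = 1)) ++ decodeR R := by
  simp [decodeR]

theorem loopA_eq_LA : ∀ (fuel : Nat) (m : Nat), m < fuel → ∀ c p m0 : Int,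
    loopA fuel (↑m) c p m0 = LA (bitsN m) c p m0 := by
  intro fuel
  induction fuel with
  | zero => intro m hm; omega
  | succ fuel ih =>
    intro m hm c p m0
    by_cases h0 : m = 0
    · subst h0; rw [loopA, bitsN]; norm_num [LA]
    · have hne : ((↑m : Int) ≠ 0) := by omega
      have hband1 : PySem.Int.band (↑m) 1 = ↑(m % 2) := by
        rw [band_one_natCast, Nat.and_one_is_mod]
      rw [loopA, if_pos hne, bitsN, if_neg h0, natCast_shiftRight]
      rcases Nat.mod_two_eq_zero_or_one m with hm2 | hm2
      · -- even: bit is 0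
        have hc : ¬ (PySem.Int.band (↑m) 1 = 1) := by rw [hband1, hm2]; norm_num
        rw [if_neg hc]
        have hbit : decide (m % 2 = 1) = false := by simp [hm2]
        rw [hbit]
        have hPQ : (if PySem.Int.band (↑m) 2 = 0 then (0:Int) else c) =
            (if (bitsN (m / 2)).head?.getD false then c else 0) := by
          rw [band_two_natCast, bitsN_head_getD]
          rcases Nat.mod_two_eq_zero_or_one (m / 2) with h2 | h2
          · have hz : m &&& 2 = 0 := (and_two_eq_zero m).mpr h2
            rw [hz]
            simp
            omega
          · have hz : m &&& 2 ≠ 0 := by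
              intro h; exact absurd ((and_two_eq_zero m).mp h) (by omega)
            have hnz : ((m &&& 2 : Nat) : Int) ≠ 0 := by exact_mod_cast hz
            rw [if_neg hnz]
            simp
            omega
        show loopA fuel (↑(m / 2)) 0 (if PySem.Int.band (↑m) 2 = 0 then (0:Int) else c)
            (max ((if PySem.Int.band (↑m) 2 = 0 then (0:Int) else c) + 0 + 1) m0) =
          LA (false :: bitsN (m / 2)) c p m0
        have hRHS : LA (false :: bitsN (m / 2)) c p m0 =
            LA (bitsN (m / 2)) 0 (if (bitsN (m / 2)).head?.getD false then c else 0)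
              (max ((if (bitsN (m / 2)).head?.getD false then c else 0) + 0 + 1) m0) := rfl
        rw [hRHS, hPQ, ih (m / 2) (by omega)]
      · -- odd: bit is 1
        have hc : PySem.Int.band (↑m) 1 = 1 := by rw [hband1, hm2]; norm_num
        rw [if_pos hc]
        have hbit : decide (m % 2 = 1) = true := by simp [hm2]
        rw [hbit]
        have hRHS : LA (true :: bitsN (m / 2)) c p m0 =
            LA (bitsN (m / 2)) (c + 1) p (max (p + (c + 1) + 1) m0) := rfl
        rw [hRHS, ih (m / 2) (by omega)]

theorem takeRun_spec (b : Int) :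
    ∀ (fuel : Nat) (m : Nat), m ≤ fuel → ∀ ln : Int, ∃ (k m' : Nat),
      takeRun fuel (↑m) b ln = (↑m', ln + ↑k) ∧
      bitsN m = List.replicate k (decide (b = 1)) ++ bitsN m' ∧
      (m' = 0 ∨ PySem.Int.band (↑m') 1 ≠ b) ∧ m' ≤ m ∧
      (0 < m ∧ PySem.Int.band (↑m) 1 = b → 1 ≤ k ∧ m' < m) ∧
      (0 < m ∧ b = 0 → 0 < m') := by
  intro fuel
  induction fuel with
  | zero =>
      intro m hm ln
      have h0 : m = 0 := by omega
      subst h0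
      exact ⟨0, 0, by rw [takeRun]; simp, by simp, Or.inl rfl, le_rfl,
        by omega, by omega⟩
  | succ fuel ih =>
    intro m hm ln
    by_cases hc : ((↑m:Int) ≠ 0 ∧ PySem.Int.band (↑m) 1 = b)
    · -- loop iterates
      have hm0 : m ≠ 0 := by rcases hc with ⟨h1, _⟩; omega
      have hstep : takeRun (fuel + 1) (↑m) b ln = takeRun fuel (↑(m / 2)) b (ln + 1) := by
        rw [takeRun, if_pos hc, natCast_shiftRight]
      obtain ⟨k', m', heq, hbits, hstop, hle, _, hz0⟩ := ih (m / 2) (by omega) (ln + 1)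
      refine ⟨k' + 1, m', ?_, ?_, hstop, by omega, fun _ => ⟨by omega, by omega⟩, ?_⟩
      · rw [hstep, heq]
        have : ln + ((k' + 1 : Nat) : Int) = ln + 1 + ↑k' := by push_cast; ring
        rw [this]
      · rw [bitsN, if_neg hm0, hbits, List.replicate_succ]
        have hdm : decide (m % 2 = 1) = decide (b = 1) := by
          rcases hc with ⟨_, hb⟩
          rw [band_one_natCast, Nat.and_one_is_mod] at hb
          rcases Nat.mod_two_eq_zero_or_one m with h2 | h2 <;>
            · rw [h2] at hb ⊢
              simp at hb ⊢
              omega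
        rw [hdm]; rfl
      · intro ⟨hmp, hb0⟩
        have h2 : m % 2 = 0 := by
          rcases hc with ⟨_, hb⟩
          rw [hb0, band_one_natCast, Nat.and_one_is_mod] at hb
          exact_mod_cast hb
        exact hz0 ⟨by omega, hb0⟩
    · -- loop stops immediately
      refine ⟨0, m, ?_, by simp, ?_, le_rfl, fun h => absurd ⟨by omega, h.2⟩ hc, fun h => ?_⟩
      · rw [takeRun, if_neg hc]; simp
      · by_cases hm0 : m = 0
        · exact Or.inl hm0
        · right
          intro hb
          exact hc ⟨by omega, hb⟩
      · rcases h with ⟨hmp, rfl⟩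
        by_cases hm2 : m % 2 = 0
        · exfalso
          apply hc
          refine ⟨by omega, ?_⟩
          rw [band_one_natCast, Nat.and_one_is_mod, hm2]; rfl
        · omega

-- what rleInt produces: a decode-faithful, well-formed runs list (possibly with one leading 0-run)
theorem rleInt_spec_aux : ∀ (fuel : Nat) (m : Nat), m < fuel →
    (m = 0 → rleInt fuel ↑m = []) ∧ decodeR (rleInt fuel ↑m) = bitsN m ∧
    (m ≠ 0 →
      ((m % 2 = 1 ∧ GoodR (rleInt fuel ↑m)) ∨
       (m % 2 = 0 ∧ ∃ z R', rleInt fuel ↑m = (0, z) :: R' ∧ 1 ≤ z ∧ GoodR R'))) := by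
  intro fuel
  induction fuel with
  | zero => intro m hm; omega
  | succ fuel ih =>
    intro m hm
    by_cases h0 : m = 0
    · subst h0
      have hr : rleInt (fuel + 1) ((0:Nat):Int) = [] := by
        rw [rleInt]; simp
      refine ⟨fun _ => hr, ?_, fun h => absurd rfl h⟩
      rw [hr, bitsN]; simp [decodeR]
    · have hne : ((↑m:Int) ≠ 0) := by omega
      have hband : PySem.Int.band (↑m) 1 = ↑(m % 2) := by
        rw [band_one_natCast, Nat.and_one_is_mod]
      obtain ⟨k, m', heq, hbits, hstop, hle, hiter, hz0⟩ :=
        takeRun_spec (PySem.Int.band (↑m) 1) fuel m (by omega) 0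
      obtain ⟨hk1, hlt⟩ := hiter ⟨by omega, rfl⟩
      have hr : rleInt (fuel + 1) ↑m =
          (PySem.Int.band (↑m) 1, (takeRun fuel (↑m) (PySem.Int.band (↑m) 1) 0).2) ::
            rleInt fuel (takeRun fuel (↑m) (PySem.Int.band (↑m) 1) 0).1 := by
        rw [rleInt, if_pos hne]
      rw [heq] at hr
      simp only at hr
      obtain ⟨ih1, ih2, ih3⟩ := ih m' (by omega)
      have hdec : decodeR (rleInt (fuel + 1) ↑m) = bitsN m := by
        rw [hr, decodeR_cons, ih2, hbits]
        simp
      refine ⟨fun h => absurd h h0, hdec, fun _ => ?_⟩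
      rcases Nat.mod_two_eq_zero_or_one m with h2 | h2
      · -- even: leading 0-run
        right
        refine ⟨h2, 0 + ↑k, rleInt fuel ↑m', ?_, by omega, ?_⟩
        · rw [hr, hband, h2]; rfl
        · have hm'pos : 0 < m' := hz0 ⟨by omega, by rw [hband, h2]; rfl⟩
          have hm'odd : m' % 2 = 1 := by
            rcases hstop with h | h
            · omega
            · rw [band_one_natCast, Nat.and_one_is_mod, hband, h2] at h
              rcases Nat.mod_two_eq_zero_or_one m' with hh | hh
              · exfalso; apply h; rw [hh]
              · exact hh
          rcases ih3 (by omega) with ⟨_, hg⟩ | ⟨hc, _⟩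
          · exact hg
          · omega
      · -- odd: starts with a 1-run
        left
        refine ⟨h2, ?_⟩
        have hhd : (PySem.Int.band (↑m) 1) = 1 := by rw [hband, h2]; rfl
        by_cases hm'0 : m' = 0
        · subst hm'0
          rw [hr, hhd, ih1 rfl]
          exact GoodR.single _ (by omega)
        · have hne' : PySem.Int.band (↑m') 1 ≠ PySem.Int.band (↑m) 1 :=
            hstop.resolve_left hm'0
          have hm'even : m' % 2 = 0 := by
            rw [band_one_natCast, Nat.and_one_is_mod, hhd] at hne'
            rcases Nat.mod_two_eq_zero_or_one m' with hh | hh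
            · exact hh
            · exfalso; apply hne'; rw [hh]; rfl
          rcases ih3 hm'0 with ⟨hc, _⟩ | ⟨_, z, R', hr', hz, hg⟩
          · omega
          · rw [hr, hhd, hr']
            exact GoodR.cons _ _ _ (by omega) hz hg

theorem rleInt_spec (m : Nat) :
    decodeR (rleInt (m + 1) ↑m) = bitsN m ∧
    (rleInt (m + 1) ↑m = [] ∨ GoodR (rleInt (m + 1) ↑m) ∨
      ∃ z R', rleInt (m + 1) ↑m = (0, z) :: R' ∧ 1 ≤ z ∧ GoodR R') := by
  obtain ⟨h1, h2, h3⟩ := rleInt_spec_aux (m + 1) m (by omega)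
  refine ⟨h2, ?_⟩
  by_cases h0 : m = 0
  · exact Or.inl (h1 h0)
  · rcases h3 h0 with ⟨_, hg⟩ | ⟨_, z, R', hr, hz, hg⟩
    · exact Or.inr (Or.inl hg)
    · exact Or.inr (Or.inr ⟨z, R', hr, hz, hg⟩)

theorem LA_ones (k : Nat) (hk : 1 ≤ k) :
    ∀ (l : List Bool) (c p m0 : Int),
      LA (List.replicate k true ++ l) c p m0 = LA l (c + ↑k) p (max (p + c + ↑k + 1) m0) := by
  induction k, hk using Nat.le_induction with
  | base =>
      intro l c p m0
      have h1 : LA (List.replicate 1 true ++ l) c p m0 =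
          LA l (c + 1) p (max (p + (c + 1) + 1) m0) := rfl
      rw [h1]
      push_cast
      ring_nf
  | succ k hk ih =>
      intro l c p m0
      have h1 : LA (List.replicate (k + 1) true ++ l) c p m0 =
          LA (List.replicate k true ++ l) (c + 1) p (max (p + (c + 1) + 1) m0) := rfl
      rw [h1, ih]
      have e1 : c + 1 + (k:Int) = c + ((k + 1 : Nat):Int) := by push_cast; ring
      have e2 : max (p + (c + 1) + (k:Int) + 1) (max (p + (c + 1) + 1) m0) =
          max (p + c + ((k + 1 : Nat):Int) + 1) m0 := by push_cast; omega
      rw [e1, e2]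

theorem LA_zeros (z : Nat) (hz : 1 ≤ z) :
    ∀ (l : List Bool) (c p m0 : Int), 0 ≤ c → (l = [] ∨ l.head? = some true) →
      LA (List.replicate z false ++ l) c p m0 =
        LA l 0 (if z = 1 ∧ l ≠ [] then c else 0)
          (max ((if z = 1 ∧ l ≠ [] then c else 0) + 1) m0) := by
  induction z, hz using Nat.le_induction with
  | base =>
      intro l c p m0 hc hl
      rcases hl with rfl | hh
      · simp [LA]
      · have h1 : LA (List.replicate 1 false ++ l) c p m0 =
            LA l 0 (if l.head?.getD false then c else 0)
              (max ((if l.head?.getD false then c else 0) + 0 + 1) m0) := rfl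
        rw [h1, hh]
        have hne : l ≠ [] := by intro h; rw [h] at hh; simp at hh
        simp [hne]
  | succ z hz1 ih =>
      intro l c p m0 hc hl
      have hhead : ((List.replicate z false ++ l).head?.getD false) = false := by
        rw [replicate_false_append_head z hz1 l]
      have h1 : LA (List.replicate (z + 1) false ++ l) c p m0 =
          LA (List.replicate z false ++ l) 0
            (if (List.replicate z false ++ l).head?.getD false then c else 0)
            (max ((if (List.replicate z false ++ l).head?.getD false then c else 0) + 0 + 1) m0) := rfl
      rw [h1, hhead]
      simp only [Bool.false_eq_true, if_false]
      rw [ih l 0 0 (max (0 + 0 + 1) m0) le_rfl hl]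
      have hz2 : ¬(z + 1 = 1 ∧ l ≠ []) := by omega
      simp only [hz2, if_false]
      have hif : (if z = 1 ∧ l ≠ [] then (0:Int) else 0) = 0 := by split <;> rfl
      rw [hif]
      have : max ((0:Int) + 1) (max (0 + 0 + 1) m0) = max (0 + 1) m0 := by omega
      rw [this]

theorem replicate_append_head (k : Nat) (hk : 1 ≤ k) (l : List Bool) :
    (List.replicate k true ++ l).head? = some true := by
  cases k with
  | zero => omega
  | succ k => rfl

theorem GoodR_decode_ne_nil {R : List (Int × Int)} (h : GoodR R) : decodeR R ≠ [] := by
  cases h with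
  | single k hk => simp [decodeR]; omega
  | cons k z R hk hz hR => simp [decodeR]; intro h1; omega

theorem GoodR_decode_head {R : List (Int × Int)} (h : GoodR R) :
    (decodeR R).head? = some true := by
  cases h with
  | single k hk =>
      rw [decodeR_cons]
      simpa using replicate_append_head k.toNat (by omega) _
  | cons k z R hk hz hR =>
      rw [decodeR_cons]
      simpa using replicate_append_head k.toNat (by omega) _

theorem scanA_ge {R : List (Int × Int)} (h : GoodR R) (p : Int) :
    p + 2 ≤ scanA R p := by
  cases h with
  | single k hk => simp [scanA]; omega
  | cons k z R hk hz hR =>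
      have : scanA ((1, k) :: (0, z) :: R) p =
          max (p + k + 1) (scanA R (if z = 1 then k else 0)) := rfl
      rw [this]; omega

theorem scanA_shift (k2 : Int) (rest : List (Int × Int)) (p : Int) (hp : 0 ≤ p) :
    scanA ((1, k2) :: rest) p = max (p + k2 + 1) (scanA ((1, k2) :: rest) 0) := by
  cases rest with
  | nil => simp [scanA]; omega
  | cons q r2 =>
      obtain ⟨bz, zz⟩ := q
      have h1 : scanA ((1, k2) :: (bz, zz) :: r2) p =
          max (p + k2 + 1) (scanA r2 (if zz = 1 then k2 else 0)) := rfl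
      have h2 : scanA ((1, k2) :: (bz, zz) :: r2) 0 =
          max (0 + k2 + 1) (scanA r2 (if zz = 1 then k2 else 0)) := rfl
      rw [h1, h2]; omega

theorem LA_scanA {R : List (Int × Int)} (h : GoodR R) :
    ∀ p m0 : Int, 0 ≤ p → LA (decodeR R) 0 p m0 = max m0 (scanA R p) := by
  induction h with
  | single k hk =>
      intro p m0 hp
      rw [decodeR_cons, show decodeR ([] : List (Int × Int)) = [] from rfl,
        show (decide ((1:Int) = 1)) = true from rfl, LA_ones k.toNat (by omega)]
      have hLA : LA [] (0 + ((k.toNat : Nat) : Int)) p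
          (max (p + 0 + ((k.toNat : Nat) : Int) + 1) m0) =
          max (p + 0 + ((k.toNat : Nat) : Int) + 1) m0 := rfl
      rw [hLA, show scanA [(1, k)] p = p + k + 1 from rfl]
      omega
  | cons k z R hk hz hR ih =>
      intro p m0 hp
      rw [decodeR_cons, decodeR_cons, show (decide ((1:Int) = 1)) = true from rfl,
        show (decide ((0:Int) = 1)) = false from rfl, LA_ones k.toNat (by omega),
        LA_zeros z.toNat (by omega) (decodeR R) (0 + ((k.toNat : Nat) : Int)) p
          (max (p + 0 + ((k.toNat : Nat) : Int) + 1) m0) (by omega)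
          (Or.inr (GoodR_decode_head hR))]
      have hne := GoodR_decode_ne_nil hR
      have hP1 : (if z.toNat = 1 ∧ decodeR R ≠ [] then (0:Int) + ((k.toNat : Nat) : Int) else 0) =
          (if z = 1 then k else 0) := by
        split_ifs with h1 h2 h2
        · omega
        · exfalso; apply h2; omega
        · exfalso; apply h1; exact ⟨by omega, hne⟩
        · rfl
      rw [hP1, ih (if z = 1 then k else 0) _ (by split_ifs <;> omega)]
      rw [show scanA ((1, k) :: (0, z) :: R) p =
        max (p + k + 1) (scanA R (if z = 1 then k else 0)) from rfl]
      have hge := scanA_ge hR (if z = 1 then k else 0)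
      omega

theorem scanRuns_eq {R : List (Int × Int)} (h : GoodR R) :
    ∀ best : Int, scanRuns R best = max best (scanA R 0) := by
  induction h with
  | single k hk =>
      intro best
      rw [show scanRuns [(1, k)] best = max best (k + 1) from rfl,
        show scanA [(1, k)] 0 = 0 + k + 1 from rfl]
      omega
  | cons k z R hk hz hR ih =>
      intro best
      obtain ⟨k2, rest2, hR2, hk2⟩ : ∃ k2 rest2, R = (1, k2) :: rest2 ∧ 1 ≤ k2 := by
        cases hR with
        | single k2 hk2 => exact ⟨k2, [], rfl, hk2⟩
        | cons k2 z2 R2 hk2 hz2 hg2 => exact ⟨k2, (0, z2) :: R2, rfl, hk2⟩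
      subst hR2
      have step1 : scanRuns ((1, k) :: (0, z) :: (1, k2) :: rest2) best =
          scanRuns ((0, z) :: (1, k2) :: rest2)
            (max best (if (0:Int) = 0 ∧ z = 1 then k + k2 + 1 else k + 1)) := rfl
      have step2 : ∀ X, scanRuns ((0, z) :: (1, k2) :: rest2) X =
          scanRuns ((1, k2) :: rest2) X := fun X => rfl
      rw [step1, step2, ih]
      rw [show scanA ((1, k) :: (0, z) :: (1, k2) :: rest2) 0 =
        max (0 + k + 1) (scanA ((1, k2) :: rest2) (if z = 1 then k else 0)) from rfl]
      by_cases hz1 : z = 1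
      · rw [if_pos ⟨rfl, hz1⟩, if_pos hz1,
          scanA_shift k2 rest2 k (by omega)]
        omega
      · rw [if_neg (by simp [hz1]), if_neg hz1]
        omega

-- ===== VERDICT (by name: the statement is the Claim_ definition above) =====
theorem flip_bit_optimal_spec : Claim_equal_flip_bit_optimal := by
  intro number _ hpre
  unfold Spec_flip_bit_optimal flip_bit_optimal flip_bit_optimal_alt
  obtain ⟨m, rfl⟩ : ∃ m : Nat, number = ↑m := ⟨number.toNat, (Int.toNat_of_nonneg hpre).symm⟩
  rw [show ((↑m : Int).toNat) = m from Int.toNat_natCast m,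
    loopA_eq_LA (m + 1) m (by omega)]
  obtain ⟨hdec, hstr⟩ := rleInt_spec m
  rcases hstr with hnil | hg | ⟨z, R', heq, hz, hg⟩
  · rw [hnil] at hdec ⊢
    simp [decodeR] at hdec
    rw [hdec]; rfl
  · rw [← hdec, LA_scanA hg 0 0 le_rfl, scanRuns_eq hg 0]
  · rw [heq] at hdec ⊢
    have hzn : (1:Nat) ≤ z.toNat := by omega
    have hd' : decodeR ((0, z) :: R') = List.replicate z.toNat false ++ decodeR R' := by
      simp [decodeR]
    have hhead : decodeR R' = [] ∨ (decodeR R').head? = some true :=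
      Or.inr (GoodR_decode_head hg)
    have hz2 := LA_zeros z.toNat hzn (decodeR R') 0 0 0 le_rfl hhead
    have hif : (if z.toNat = 1 ∧ decodeR R' ≠ [] then (0:Int) else 0) = 0 := by
      split <;> rfl
    rw [hif] at hz2
    rw [← hdec, hd', hz2, LA_scanA hg 0 _ le_rfl]
    have h1 : scanRuns ((0, z) :: R') 0 = scanRuns R' 0 := rfl
    rw [h1, scanRuns_eq hg 0]
    have h2 := scanA_ge hg 0
    omega
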